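-- pv_equiv track=rewrite | github.com/beyzaozgeee/qa-python-practice | qa_test_runner.py | password_test
-- ===== SOURCE A (Python) =====
-- def password_test(password):
--     if len(password) < 8:
--         return "FAIL En az 8 karakter olmalı"
--     if not any(c.islower() for c in password):
--         return "FAIL Küçük harf giriniz"
--     if not any(c.isupper() for c in password):
--         return "FAIL Büyük harf giriniz"
--     if not any(c.isdigit() for c in password):
--         return "FAIL Bir rakam giriniz"
--     return "PASS Şifre Başarılı"
-- ===== SOURCE B (Python) =====
-- def password_test(password):
--     has_lower = has_upper = has_digit = False
--     for c in password:
--         if c.islower():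
--             has_lower = True
--         if c.isupper():
--             has_upper = True
--         if c.isdigit():
--             has_digit = True
--     if len(password) < 8:
--         return "FAIL En az 8 karakter olmalı"
--     if not has_lower:
--         return "FAIL Küçük harf giriniz"
--     if not has_upper:
--         return "FAIL Büyük harf giriniz"
--     if not has_digit:
--         return "FAIL Bir rakam giriniz"
--     return "PASS Şifre Başarılı"
-- ===== Notes on version B (the rewrite author's own statement) =====
-- stated objective: alternative
-- what changed: Replaces three independent short-circuiting any() scans with a single pass that accumulates has_lower/has_upper/has_digit flags, followed by flat guard checks in the original order.
import Mathlib
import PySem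

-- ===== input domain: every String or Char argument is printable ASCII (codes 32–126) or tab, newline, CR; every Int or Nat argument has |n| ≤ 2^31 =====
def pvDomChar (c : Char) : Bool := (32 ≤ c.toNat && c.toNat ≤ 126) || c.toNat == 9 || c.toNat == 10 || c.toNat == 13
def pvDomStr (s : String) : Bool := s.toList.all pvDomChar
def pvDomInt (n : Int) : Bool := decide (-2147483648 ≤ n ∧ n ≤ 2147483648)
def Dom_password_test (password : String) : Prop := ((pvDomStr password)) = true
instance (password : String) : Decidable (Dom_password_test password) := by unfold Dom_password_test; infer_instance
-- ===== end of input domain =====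

-- ===== PORT A =====
def password_test (password : String) : String :=
  if PySem.Str.len password < 8 then "FAIL En az 8 karakter olmalı"
  else if !(password.toList.any PySem.Chars.islower) then "FAIL Küçük harf giriniz"
  else if !(password.toList.any PySem.Chars.isupper) then "FAIL Büyük harf giriniz"
  else if !(password.toList.any PySem.Chars.isdigit) then "FAIL Bir rakam giriniz"
  else "PASS Şifre Başarılı"

-- ===== PORT B =====
-- single pass over the characters accumulating the three flags, then flat guards
def pwFlags : List Char → Bool × Bool × Bool → Bool × Bool × Bool
  | [], f => f
  | c :: cs, f =>
      pwFlags cs (f.1 || PySem.Chars.islower c, f.2.1 || PySem.Chars.isupper c,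
                  f.2.2 || PySem.Chars.isdigit c)

def password_test_alt (password : String) : String :=
  let f := pwFlags password.toList (false, false, false)
  if PySem.Str.len password < 8 then "FAIL En az 8 karakter olmalı"
  else if !f.1 then "FAIL Küçük harf giriniz"
  else if !f.2.1 then "FAIL Büyük harf giriniz"
  else if !f.2.2 then "FAIL Bir rakam giriniz"
  else "PASS Şifre Başarılı"

-- ===== PRECONDITION & SPEC =====
def Spec_password_test (password : String) (out : String) : Prop := out = password_test_alt password
instance (password : String) (out : String) : Decidable (Spec_password_test password out) := by unfold Spec_password_test; infer_instance

-- ===== CLAIM (what is proved, stated in full; the proofs are below) =====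
def Claim_equal_password_test : Prop := ∀ (password : String), Dom_password_test password → Spec_password_test password (password_test password)

-- ===== LEMMAS AND PROOFS =====

-- ===== VERDICT (by name: the statement is the Claim_ definition above) =====
theorem pwFlags_eq (cs : List Char) (f : Bool × Bool × Bool) :
    pwFlags cs f = (f.1 || cs.any PySem.Chars.islower, f.2.1 || cs.any PySem.Chars.isupper,
                    f.2.2 || cs.any PySem.Chars.isdigit) := by
  induction cs generalizing f with
  | nil => simp [pwFlags]
  | cons c cs ih =>
      simp [pwFlags, ih, Bool.or_assoc]

theorem password_test_spec : Claim_equal_password_test := by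
  intro password _
  unfold Spec_password_test password_test password_test_alt
  simp [pwFlags_eq]
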